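-- pv_equiv track=rewrite | github.com/philtweir/soirbhiochas | soirbhiochas/leabharlann/_utils.py | is_breakpoint_in_failure_area
-- ===== SOURCE A (Python) =====
-- def is_breakpoint_in_failure_area(focal, clc_pointí_teipe, fc_pointí_briste):
--     matches = any(
--         s <= pb and pb - 1 <= f
--         for pb in
--         fc_pointí_briste
--         for s, f in
--         clc_pointí_teipe
--     )
--
--     return matches
-- ===== SOURCE B (Python) =====
-- def _bisect_left(a, x):
--     lo, hi = 0, len(a)
--     while lo < hi:
--         mid = (lo + hi) // 2
--         if a[mid] < x:
--             lo = mid + 1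
--         else:
--             hi = mid
--     return lo
--
--
-- def is_breakpoint_in_failure_area(focal, clc_pointí_teipe, fc_pointí_briste):
--     bps = sorted(fc_pointí_briste)
--     for s, f in clc_pointí_teipe:
--         i = _bisect_left(bps, s)
--         if i < len(bps) and bps[i] <= f + 1:
--             return True
--     return False
-- ===== Notes on version B (the rewrite author's own statement) =====
-- stated objective: faster
-- what changed: B sorts the breakpoints once and, for each failure interval, binary-searches (hand-written bisect_left) for the first breakpoint >= start and checks it against end+1, instead of A's double any-scan over all breakpoint/interval pairs.
import Mathlib
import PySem

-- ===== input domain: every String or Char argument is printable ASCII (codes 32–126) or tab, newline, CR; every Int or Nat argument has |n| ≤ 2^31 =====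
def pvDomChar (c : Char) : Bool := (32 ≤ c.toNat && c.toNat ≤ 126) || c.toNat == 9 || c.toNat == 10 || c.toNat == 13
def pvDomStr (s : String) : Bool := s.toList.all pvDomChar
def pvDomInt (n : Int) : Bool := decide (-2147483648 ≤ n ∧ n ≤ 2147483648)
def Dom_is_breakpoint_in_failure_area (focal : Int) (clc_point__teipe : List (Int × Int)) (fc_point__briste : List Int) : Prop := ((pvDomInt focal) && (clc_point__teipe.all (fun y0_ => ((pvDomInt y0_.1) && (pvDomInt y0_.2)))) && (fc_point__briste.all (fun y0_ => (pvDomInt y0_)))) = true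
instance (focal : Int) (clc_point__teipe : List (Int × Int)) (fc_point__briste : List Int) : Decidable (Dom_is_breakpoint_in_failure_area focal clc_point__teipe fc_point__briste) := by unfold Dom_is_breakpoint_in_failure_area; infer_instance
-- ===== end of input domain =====

-- B sorts the breakpoints once and binary-searches each interval for a covered breakpoint:
-- O((n+m) log m) instead of A's O(n·m) double scan; same result on all inputs.

-- ===== PORT A =====
-- any(s <= pb and pb - 1 <= f  for pb in fc_pointí_briste  for s, f in clc_pointí_teipe)
def is_breakpoint_in_failure_area (focal : Int) (clc_point__teipe : List (Int × Int)) (fc_point__briste : List Int) : Bool :=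
  fc_point__briste.any (fun pb =>
    clc_point__teipe.any (fun sf => decide (sf.1 ≤ pb ∧ pb - 1 ≤ sf.2)))

-- ===== PORT B =====
-- hand-written bisect_left from Source B; indices stay in range, so getD's default is never read
def pvBisectLeft (a : List Int) (x : Int) (lo hi : Nat) : Nat :=
  if h : lo < hi then
    let mid := (lo + hi) / 2
    if a.getD mid 0 < x then pvBisectLeft a x (mid + 1) hi
    else pvBisectLeft a x lo mid
  else lo
termination_by hi - lo
decreasing_by all_goals omega

-- the for-loop over intervals with early return
def pvAltLoop (bps : List Int) (ivs : List (Int × Int)) : Bool :=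
  match ivs with
  | [] => false
  | sf :: rest =>
    let i := pvBisectLeft bps sf.1 0 bps.length
    if i < bps.length ∧ bps.getD i 0 ≤ sf.2 + 1 then true
    else pvAltLoop bps rest

def is_breakpoint_in_failure_area_alt (focal : Int) (clc_point__teipe : List (Int × Int)) (fc_point__briste : List Int) : Bool :=
  pvAltLoop (PySem.List.sorted fc_point__briste (fun x => x) false) clc_point__teipe

-- ===== PRECONDITION & SPEC =====
def Spec_is_breakpoint_in_failure_area (focal : Int) (clc_point__teipe : List (Int × Int)) (fc_point__briste : List Int) (out : Bool) : Prop := out = is_breakpoint_in_failure_area_alt focal clc_point__teipe fc_point__briste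
instance (focal : Int) (clc_point__teipe : List (Int × Int)) (fc_point__briste : List Int) (out : Bool) : Decidable (Spec_is_breakpoint_in_failure_area focal clc_point__teipe fc_point__briste out) := by unfold Spec_is_breakpoint_in_failure_area; infer_instance

-- ===== CLAIM (what is proved, stated in full; the proofs are below) =====
def Claim_equal_is_breakpoint_in_failure_area : Prop := ∀ (focal : Int) (clc_point__teipe : List (Int × Int)) (fc_point__briste : List Int), Dom_is_breakpoint_in_failure_area focal clc_point__teipe fc_point__briste → Spec_is_breakpoint_in_failure_area focal clc_point__teipe fc_point__briste (is_breakpoint_in_failure_area focal clc_point__teipe fc_point__briste)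

-- ===== LEMMAS AND PROOFS =====

-- sorted-list entries are monotone in the index
lemma pvGetD_mono (a : List Int) (hs : a.Pairwise (· ≤ ·)) (p q : Nat)
    (hpq : p ≤ q) (hq : q < a.length) : a.getD p 0 ≤ a.getD q 0 := by
  rcases Nat.lt_or_ge p q with h | h
  · have := (List.pairwise_iff_getElem.mp hs) p q (lt_trans h hq) hq h
    rwa [List.getD_eq_getElem _ _ (lt_trans h hq), List.getD_eq_getElem _ _ hq]
  · have : p = q := le_antisymm hpq h
    subst this; exact le_refl _

-- invariant of the hand-written bisect_left
lemma pvBisectLeft_inv (a : List Int) (hs : a.Pairwise (· ≤ ·)) (x : Int) :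
    ∀ n lo hi, hi - lo = n → lo ≤ hi → hi ≤ a.length →
    (∀ j, j < lo → a.getD j 0 < x) →
    (∀ j, hi ≤ j → j < a.length → x ≤ a.getD j 0) →
    lo ≤ pvBisectLeft a x lo hi ∧ pvBisectLeft a x lo hi ≤ hi ∧
    (∀ j, j < pvBisectLeft a x lo hi → a.getD j 0 < x) ∧
    (∀ j, pvBisectLeft a x lo hi ≤ j → j < a.length → x ≤ a.getD j 0) := by
  intro n
  induction n using Nat.strong_induction_on with
  | _ n ih =>
    intro lo hi hn hle hhi hlo hup
    unfold pvBisectLeft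
    by_cases h : lo < hi
    · simp only [h, dif_pos]
      set mid := (lo + hi) / 2 with hmid
      have hmlo : lo ≤ mid := by omega
      have hmhi : mid < hi := by omega
      by_cases hc : a.getD mid 0 < x
      · rw [if_pos hc]
        have := ih (hi - (mid + 1)) (by omega) (mid + 1) hi rfl (by omega) hhi
          (fun j hj => by
            rcases Nat.lt_or_ge j lo with hj' | hj'
            · exact hlo j hj'
            · exact lt_of_le_of_lt (pvGetD_mono a hs j mid (by omega) (by omega)) hc)
          hup
        exact ⟨by omega, by omega, this.2.2.1, this.2.2.2⟩
      · rw [if_neg hc]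
        rw [not_lt] at hc
        have := ih (mid - lo) (by omega) lo mid rfl (by omega) (by omega) hlo
          (fun j hj hj' => le_trans hc (pvGetD_mono a hs mid j hj hj'))
        exact ⟨this.1, by omega, this.2.2.1, this.2.2.2⟩
    · simp only [h, dif_neg, not_false_iff]
      exact ⟨le_refl _, hle, hlo, fun j hj hj' => hup j (by omega) hj'⟩

-- the bisect-based containment check finds a breakpoint in [s, t] iff one exists
lemma pvBisect_correct (a : List Int) (hs : a.Pairwise (· ≤ ·)) (x t : Int) :
    (pvBisectLeft a x 0 a.length < a.length ∧
      a.getD (pvBisectLeft a x 0 a.length) 0 ≤ t) ↔ ∃ y ∈ a, x ≤ y ∧ y ≤ t := by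
  obtain ⟨-, hle, hlt, hge⟩ := pvBisectLeft_inv a hs x (a.length - 0) 0 a.length rfl
    (Nat.zero_le _) (le_refl _) (fun j hj => absurd hj (Nat.not_lt_zero j))
    (fun j hj hj' => absurd hj' (by omega))
  set i := pvBisectLeft a x 0 a.length with hi
  constructor
  · rintro ⟨hlen, ht⟩
    refine ⟨a.getD i 0, ?_, hge i (le_refl _) hlen, ht⟩
    rw [List.getD_eq_getElem _ _ hlen]; exact a.getElem_mem hlen
  · rintro ⟨y, hy, hxy, hyt⟩
    obtain ⟨j, hj, rfl⟩ := List.getElem_of_mem hy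
    have hij : i ≤ j := by
      by_contra hij
      have := hlt j (by omega)
      rw [List.getD_eq_getElem _ _ hj] at this; omega
    have hilen : i < a.length := lt_of_le_of_lt hij hj
    refine ⟨hilen, ?_⟩
    have := pvGetD_mono a hs i j hij hj
    rw [List.getD_eq_getElem _ _ hj] at this; omega

lemma pvAltLoop_eq (bps : List Int) (hs : bps.Pairwise (· ≤ ·)) (ivs : List (Int × Int)) :
    pvAltLoop bps ivs = ivs.any (fun sf => decide (∃ y ∈ bps, sf.1 ≤ y ∧ y ≤ sf.2 + 1)) := by
  induction ivs with
  | nil => rfl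
  | cons sf rest ih =>
    have hcor := pvBisect_correct bps hs sf.1 (sf.2 + 1)
    simp only [pvAltLoop, List.any_cons, ih]
    by_cases h : pvBisectLeft bps sf.1 0 bps.length < bps.length ∧
        bps.getD (pvBisectLeft bps sf.1 0 bps.length) 0 ≤ sf.2 + 1
    · rw [if_pos h, decide_eq_true (hcor.mp h), Bool.true_or]
    · have hd : decide (∃ y ∈ bps, sf.1 ≤ y ∧ y ≤ sf.2 + 1) = false :=
        decide_eq_false (fun hx => h (hcor.mpr hx))
      rw [if_neg h, hd, Bool.false_or]

-- ===== VERDICT (by name: the statement is the Claim_ definition above) =====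
theorem is_breakpoint_in_failure_area_spec : Claim_equal_is_breakpoint_in_failure_area := by
  intro focal ivs bps _
  unfold Spec_is_breakpoint_in_failure_area
  unfold is_breakpoint_in_failure_area is_breakpoint_in_failure_area_alt
  rw [pvAltLoop_eq _ (PySem.List.sorted_pairwise (key := fun x => x) (xs := bps)) ivs,
      Bool.eq_iff_iff]
  simp only [List.any_eq_true, decide_eq_true_eq, PySem.List.mem_sorted]
  constructor
  · rintro ⟨pb, hpb, sf, hsf, h1, h2⟩
    exact ⟨sf, hsf, pb, hpb, h1, by omega⟩
  · rintro ⟨sf, hsf, pb, hpb, h1, h2⟩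
    exact ⟨pb, hpb, sf, hsf, h1, by omega⟩
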